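-- pv_equiv track=rewrite | github.com/mati-fortunka/various_programs | cd_plot_together.py | find_start_index
-- ===== SOURCE A (Python) =====
-- def find_start_index(lines, keyword, offset=3):
--     count = 0
--     for i, line in enumerate(lines):
--         if keyword in line:
--             count += 1
--             if count == 2:
--                 return i + offset  # Start index is `offset` lines after the second occurrence
--     raise ValueError(f"The second occurrence of '{keyword}' was not found in the file.")
-- ===== SOURCE B (Python) =====
-- def find_start_index(lines, keyword, offset=3):
--     def first_match(chunk):
--         for j, line in enumerate(chunk):
--             if keyword in line:
--                 return j
--         return None
--     i1 = first_match(lines)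
--     if i1 is not None:
--         i2 = first_match(lines[i1 + 1:])
--         if i2 is not None:
--             return i1 + 1 + i2 + offset
--     raise ValueError(f"The second occurrence of '{keyword}' was not found in the file.")
-- ===== Notes on version B (the rewrite author's own statement) =====
-- stated objective: alternative
-- what changed: B decomposes the task into two staged searches with a reusable first-match helper: find the first matching line, slice the list past it, find the first match of the remainder, and add the indices; A is a single scan with a running occurrence counter and early return.
import Mathlib
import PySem

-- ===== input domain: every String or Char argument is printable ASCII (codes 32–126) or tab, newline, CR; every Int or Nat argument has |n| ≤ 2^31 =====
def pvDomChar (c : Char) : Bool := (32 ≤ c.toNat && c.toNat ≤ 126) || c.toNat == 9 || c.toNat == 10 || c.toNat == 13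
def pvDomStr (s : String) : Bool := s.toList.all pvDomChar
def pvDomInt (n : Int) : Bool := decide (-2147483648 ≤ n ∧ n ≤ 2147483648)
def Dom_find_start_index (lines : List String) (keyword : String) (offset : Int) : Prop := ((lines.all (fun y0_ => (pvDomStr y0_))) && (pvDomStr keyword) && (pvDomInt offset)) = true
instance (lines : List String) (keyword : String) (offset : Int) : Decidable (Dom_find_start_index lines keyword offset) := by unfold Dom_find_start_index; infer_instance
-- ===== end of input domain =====

-- B replaces A's single counting scan by two staged first-match searches over the list and its sliced remainder (objective: alternative decomposition).
-- ===== PORT A =====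
-- A's for-loop with its running count; none = the function's ValueError path
def goA (lines : List String) (keyword : String) (offset : Int) (i : Int) (count : Nat) : Option Int :=
  match lines with
  | [] => none
  | l :: rest =>
    if PySem.Str.isIn keyword l then
      if count + 1 = 2 then some (i + offset)
      else goA rest keyword offset (i + 1) (count + 1)
    else goA rest keyword offset (i + 1) count

def find_start_index (lines : List String) (keyword : String) (offset : Int) : Int :=
  (goA lines keyword offset 0 0).getD 0   -- Pre_ excludes the ValueError (none) case

-- ===== PORT B =====
-- B's helper first_match: index of the first line containing keyword, none if absent
def firstMatch (chunk : List String) (keyword : String) : Option Nat :=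
  match chunk with
  | [] => none
  | l :: rest =>
    if PySem.Str.isIn keyword l then some 0
    else (firstMatch rest keyword).map (· + 1)

def find_start_index_alt (lines : List String) (keyword : String) (offset : Int) : Int :=
  match firstMatch lines keyword with
  | none => 0   -- the ValueError path, excluded by Pre_
  | some i1 =>
    match firstMatch (PySem.List.slice lines (some ((i1 : Int) + 1)) none) keyword with
    | none => 0   -- the ValueError path, excluded by Pre_
    | some i2 => (i1 : Int) + 1 + (i2 : Int) + offset

-- ===== PRECONDITION & SPEC =====
-- exactly the inputs on which A returns (fewer than two matching lines = ValueError in both programs)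
def Pre_find_start_index (lines : List String) (keyword : String) (offset : Int) : Prop :=
  2 ≤ (lines.filter (fun l => PySem.Str.isIn keyword l)).length
instance (lines : List String) (keyword : String) (offset : Int) : Decidable (Pre_find_start_index lines keyword offset) := by unfold Pre_find_start_index; infer_instance
def pvWitness_find_start_index : List String × String × Int := (["xay", "b", "za"], "a", 3)
def Spec_find_start_index (lines : List String) (keyword : String) (offset : Int) (out : Int) : Prop := out = find_start_index_alt lines keyword offset
instance (lines : List String) (keyword : String) (offset : Int) (out : Int) : Decidable (Spec_find_start_index lines keyword offset out) := by unfold Spec_find_start_index; infer_instance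

-- ===== CLAIM (what is proved, stated in full; the proofs are below) =====
def Claim_equal_find_start_index : Prop := ∀ (lines : List String) (keyword : String) (offset : Int), Dom_find_start_index lines keyword offset → Pre_find_start_index lines keyword offset → Spec_find_start_index lines keyword offset (find_start_index lines keyword offset)

-- ===== LEMMAS AND PROOFS =====

-- one-step unfolding equations (rfl), so the inner recursive calls stay folded under rw
theorem goA_cons (l : String) (rest : List String) (keyword : String) (offset i : Int) (count : Nat) :
    goA (l :: rest) keyword offset i count =
      if PySem.Chars.isIn keyword.toList l.toList then
        (if count + 1 = 2 then some (i + offset) else goA rest keyword offset (i + 1) (count + 1))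
      else goA rest keyword offset (i + 1) count := rfl

theorem firstMatch_cons (l : String) (rest : List String) (keyword : String) :
    firstMatch (l :: rest) keyword =
      if PySem.Chars.isIn keyword.toList l.toList then some 0
      else (firstMatch rest keyword).map (· + 1) := rfl

-- A's loop in state count = 1 returns the index of the NEXT match (B's firstMatch), shifted by i, plus offset
theorem goA_one (lines : List String) (keyword : String) (offset : Int) (i : Int) :
    goA lines keyword offset i 1 = (firstMatch lines keyword).map (fun j => i + (j : Int) + offset) := by
  induction lines generalizing i with
  | nil => rfl
  | cons l rest ih =>
    rw [goA_cons, firstMatch_cons]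
    cases h : PySem.Chars.isIn keyword.toList l.toList
    · rw [if_neg (by simp), if_neg (by simp), ih]
      cases firstMatch rest keyword with
      | none => simp
      | some j => simp; omega
    · rw [if_pos rfl, if_pos rfl, if_pos rfl]
      simp

-- A's loop in state count = 0 is B's two staged searches (with drop in place of the slice)
theorem goA_zero (lines : List String) (keyword : String) (offset : Int) (i : Int) :
    goA lines keyword offset i 0 =
      match firstMatch lines keyword with
      | none => none
      | some j1 => (firstMatch (lines.drop (j1 + 1)) keyword).map
          (fun j2 => i + (j1 : Int) + 1 + (j2 : Int) + offset) := by
  induction lines generalizing i with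
  | nil => rfl
  | cons l rest ih =>
    rw [goA_cons, firstMatch_cons]
    cases h : PySem.Chars.isIn keyword.toList l.toList
    · rw [if_neg (by simp), if_neg (by simp), ih]
      cases hf : firstMatch rest keyword with
      | none => simp
      | some j1 =>
        simp only [Option.map_some, List.drop_succ_cons]
        cases firstMatch (rest.drop (j1 + 1)) keyword with
        | none => simp
        | some j2 => simp; omega
    · rw [if_pos rfl, if_pos rfl, if_neg (by omega), goA_one]
      simp only [List.drop_succ_cons, List.drop_zero]
      cases firstMatch rest keyword with
      | none => simp
      | some j => simp

-- firstMatch fails exactly when no line matches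
theorem firstMatch_none_iff (lines : List String) (keyword : String) :
    firstMatch lines keyword = none ↔ (lines.filter (fun l => PySem.Str.isIn keyword l)).length = 0 := by
  induction lines with
  | nil => simp [firstMatch]
  | cons l rest ih =>
    rw [firstMatch_cons, List.filter_cons]
    cases h : PySem.Chars.isIn keyword.toList l.toList <;>
      simp [PySem.Str.isIn, h, ih]

-- dropping past the first match loses exactly one matching line
theorem filter_drop_firstMatch (lines : List String) (keyword : String) (j : Nat)
    (hj : firstMatch lines keyword = some j) :
    ((lines.drop (j + 1)).filter (fun l => PySem.Str.isIn keyword l)).length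
      = (lines.filter (fun l => PySem.Str.isIn keyword l)).length - 1 := by
  induction lines generalizing j with
  | nil => simp [firstMatch] at hj
  | cons l rest ih =>
    rw [firstMatch_cons] at hj
    cases h : PySem.Chars.isIn keyword.toList l.toList
    · rw [if_neg (by simp [h])] at hj
      cases hf : firstMatch rest keyword with
      | none => rw [hf] at hj; simp at hj
      | some j' =>
        rw [hf] at hj; simp at hj
        subst hj
        rw [List.drop_succ_cons, List.filter_cons, ih j' hf]
        simp [PySem.Str.isIn, h]
    · rw [if_pos h, Option.some.injEq] at hj
      subst hj
      rw [List.drop_succ_cons, List.drop_zero, List.filter_cons]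
      simp [PySem.Str.isIn, h]

-- ===== VERDICT (by name: the statement is the Claim_ definition above) =====
theorem find_start_index_spec : Claim_equal_find_start_index := by
  intro lines keyword offset _ hpre
  unfold Pre_find_start_index at hpre
  unfold Spec_find_start_index find_start_index find_start_index_alt
  rw [goA_zero]
  cases h1 : firstMatch lines keyword with
  | none =>
    rw [firstMatch_none_iff] at h1; omega
  | some j1 =>
    have hsl : PySem.List.slice lines (some ((j1 : Int) + 1)) none = lines.drop (j1 + 1) := by
      have hc : ((j1 : Int) + 1) = ((j1 + 1 : Nat) : Int) := by push_cast; ring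
      rw [hc, PySem.List.slice_from_natCast]
    simp only [hsl]
    cases h2 : firstMatch (lines.drop (j1 + 1)) keyword with
    | none =>
      rw [firstMatch_none_iff] at h2
      have := filter_drop_firstMatch lines keyword j1 h1
      omega
    | some j2 => simp
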